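-- pv_equiv track=rewrite | github.com/Ultrasubha/MyCodes | Python/squiglyLine.py | arrSplitter
-- ===== SOURCE A (Python) =====
-- def arrSplitter(n,num):
--     arr=[]
--     start = 0
--     end = 1
--     incrementor = 1
--     while end < n+1:
--         arr.append(num[start:end])
--         start = end
--         incrementor +=1
--         end += incrementor
--     return arr
-- ===== SOURCE B (Python) =====
-- def _isqrt(x):
--     # Newton's method integer square root (exact floor sqrt for x >= 0).
--     if x < 2:
--         return x
--     r = 1 << ((x.bit_length() + 1) // 2)
--     while r * r > x:
--         r = (r + x // r) // 2
--     return r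
--
--
-- def arrSplitter(n, num):
--     # Closed form: the number of chunks is the largest m with m(m+1)/2 <= n,
--     # i.e. m = (isqrt(8n+1)-1)//2; chunk k occupies the triangular index range
--     # [k(k-1)/2, k(k+1)/2). No running boundaries or loop state at all.
--     if n <= 0:
--         return []
--     m = (_isqrt(8 * n + 1) - 1) // 2
--     return [num[k * (k - 1) // 2 : k * (k + 1) // 2] for k in range(1, m + 1)]
-- ===== Notes on version B (the rewrite author's own statement) =====
-- stated objective: alternative
-- what changed: B computes the chunk count in closed form, m = (isqrt(8n+1)-1)//2 with a hand-written Newton integer square root, and emits each chunk directly from the triangular-number index formula num[k(k-1)/2 : k(k+1)/2], instead of A's loop that advances start/end boundaries with a growing incrementor.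
import Mathlib
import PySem

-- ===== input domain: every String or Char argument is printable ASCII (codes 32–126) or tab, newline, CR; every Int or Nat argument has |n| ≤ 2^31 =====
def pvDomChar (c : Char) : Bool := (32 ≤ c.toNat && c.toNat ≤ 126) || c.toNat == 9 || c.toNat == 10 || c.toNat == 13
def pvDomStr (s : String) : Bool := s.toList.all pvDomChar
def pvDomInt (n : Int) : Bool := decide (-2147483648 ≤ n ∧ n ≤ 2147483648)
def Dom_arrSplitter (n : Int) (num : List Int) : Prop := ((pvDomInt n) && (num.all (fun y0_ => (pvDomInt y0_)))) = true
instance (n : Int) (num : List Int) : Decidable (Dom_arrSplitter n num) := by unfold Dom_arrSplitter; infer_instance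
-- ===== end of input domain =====

-- B replaces A's running-boundary loop by a closed form: the chunk count comes from a
-- Newton integer square root and each chunk's bounds from the triangular-number formula.

-- ===== PORT A =====
-- A's while-loop; j is (incrementor - 1) as a Nat (incrementor ≥ 1 throughout A's loop).
def arrSplitterAux (n : Int) (num : List Int) (start e : Int) (j : Nat) (arr : List (List Int)) : List (List Int) :=
  if e < n + 1 then
    arrSplitterAux n num e (e + ((j : Int) + 2)) (j + 1) (arr ++ [PySem.List.slice num start e])
  else arr
termination_by (n + 1 - e).toNat
decreasing_by omega

def arrSplitter (n : Int) (num : List Int) : List (List Int) :=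
  arrSplitterAux n num 0 1 0 []

-- ===== PORT B =====
-- Source B's helpers: every value reached here is a nonnegative Python int, so Nat
-- arithmetic is exact ('//' on nonnegatives = Nat division, x.bit_length() = bitLen).
def bitLen (x : Nat) : Nat :=
  if x = 0 then 0 else bitLen (x / 2) + 1

-- the 'while r*r > x' Newton loop of _isqrt
def newtonLoop (x r : Nat) : Nat :=
  if h : x < r * r then newtonLoop x ((r + x / r) / 2) else r
termination_by r
decreasing_by
  have hr : 0 < r := by
    rcases Nat.eq_zero_or_pos r with h0 | h0
    · subst h0; simp at h
    · exact h0
  have hd : x / r < r := (Nat.div_lt_iff_lt_mul hr).mpr h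
  omega

def isqrtP (x : Int) : Int :=
  if x < 2 then x
  else ((newtonLoop x.toNat (1 <<< ((bitLen x.toNat + 1) / 2)) : Nat) : Int)

def arrSplitter_alt (n : Int) (num : List Int) : List (List Int) :=
  if n ≤ 0 then []
  else
    let m := PySem.Int.floordiv (isqrtP (8 * n + 1) - 1) 2
    (PySem.List.pyRange 1 (m + 1) 1).map (fun k =>
      PySem.List.slice num (some (PySem.Int.floordiv (k * (k - 1)) 2))
                           (some (PySem.Int.floordiv (k * (k + 1)) 2)))

-- ===== PRECONDITION & SPEC =====
def Spec_arrSplitter (n : Int) (num : List Int) (out : List (List Int)) : Prop := out = arrSplitter_alt n num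
instance (n : Int) (num : List Int) (out : List (List Int)) : Decidable (Spec_arrSplitter n num out) := by unfold Spec_arrSplitter; infer_instance

-- ===== CLAIM (what is proved, stated in full; the proofs are below) =====
def Claim_equal_arrSplitter : Prop := ∀ (n : Int) (num : List Int), Dom_arrSplitter n num → Spec_arrSplitter n num (arrSplitter n num)

-- ===== LEMMAS AND PROOFS =====

-- description of A's loop: the list of (start, end) boundary pairs from state (s, k)
def pairs (n s : Int) (k : Nat) : List (Int × Int) :=
  if s + ((k : Int) + 1) ≤ n then
    (s, s + ((k : Int) + 1)) :: pairs n (s + ((k : Int) + 1)) (k + 1)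
  else []
termination_by (n - s).toNat
decreasing_by omega

theorem arrSplitterAux_eq (n : Int) (num : List Int) :
    ∀ (s : Int) (j : Nat) (arr : List (List Int)),
      arrSplitterAux n num s (s + ((j : Int) + 1)) j arr
        = arr ++ (pairs n s j).map (fun p => PySem.List.slice num p.1 p.2) := by
  intro s j arr
  induction hm : (n - s).toNat using Nat.strong_induction_on generalizing s j arr with
  | _ m ih =>
    rw [arrSplitterAux, pairs]
    by_cases h : s + ((j : Int) + 1) ≤ n
    · simp only [if_pos (by omega : s + ((j : Int) + 1) < n + 1), if_pos h]
      have heq : s + ((j : Int) + 1) + ((j : Int) + 2)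
          = (s + ((j : Int) + 1)) + (((j + 1 : Nat) : Int) + 1) := by push_cast; ring
      rw [heq, ih ((n - (s + ((j : Int) + 1))).toNat) (by omega) _ _ _ rfl]
      simp
    · simp only [if_neg (by omega : ¬ s + ((j : Int) + 1) < n + 1), if_neg h]
      simp

-- triangular numbers
def tri (k : Nat) : Nat := k * (k + 1) / 2

theorem two_mul_tri (k : Nat) : 2 * tri k = k * (k + 1) := by
  obtain ⟨c, hc⟩ := Nat.even_mul_succ_self k
  simp only [tri, hc]
  omega

theorem lt_two_pow_bitLen (x : Nat) : x < 2 ^ bitLen x := by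
  induction x using Nat.strong_induction_on with
  | _ x ih =>
    rw [bitLen]
    by_cases h : x = 0
    · simp [h]
    · rw [if_neg h]
      have := ih (x / 2) (by omega)
      rw [pow_succ]
      omega

theorem sqrt_le_init (x : Nat) : Nat.sqrt x ≤ 2 ^ ((bitLen x + 1) / 2) := by
  set e := (bitLen x + 1) / 2 with he
  by_contra hlt
  push_neg at hlt
  have h1 : x < 2 ^ bitLen x := lt_two_pow_bitLen x
  have h2 : 2 ^ bitLen x ≤ 2 ^ (2 * e) := Nat.pow_le_pow_right (by omega) (by omega)
  have h3 : 2 ^ (2 * e) = 2 ^ e * 2 ^ e := by rw [two_mul, pow_add]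
  have h4 : Nat.sqrt x * Nat.sqrt x ≤ x := by have h := Nat.sqrt_le' x; rwa [pow_two] at h
  have h5 : 2 ^ e * 2 ^ e ≤ Nat.sqrt x * Nat.sqrt x := Nat.mul_le_mul (by omega) (by omega)
  omega

theorem am_gm_step (x r : Nat) (hr : 0 < r) : Nat.sqrt x ≤ (r + x / r) / 2 := by
  have hx : Nat.sqrt x * Nat.sqrt x ≤ x := by have h := Nat.sqrt_le' x; rwa [pow_two] at h
  by_cases hcase : 2 * Nat.sqrt x ≤ r
  · have h1 : Nat.sqrt x ≤ r / 2 := by omega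
    have h2 : r / 2 ≤ (r + x / r) / 2 := Nat.div_le_div_right (Nat.le_add_right r (x / r))
    omega
  · push_neg at hcase
    have hkey : (2 * Nat.sqrt x - r) * r ≤ Nat.sqrt x * Nat.sqrt x := by
      zify [Nat.le_of_lt hcase]
      nlinarith [sq_nonneg ((Nat.sqrt x : Int) - r)]
    have hdiv : 2 * Nat.sqrt x - r ≤ x / r := (Nat.le_div_iff_mul_le hr).mpr (hkey.trans hx)
    omega

theorem newtonLoop_eq_sqrt (x : Nat) :
    ∀ r, Nat.sqrt x ≤ r → newtonLoop x r = Nat.sqrt x := by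
  intro r
  induction r using Nat.strong_induction_on with
  | _ r ih =>
    intro hge
    rw [newtonLoop]
    by_cases h : x < r * r
    · rw [dif_pos h]
      have hr : 0 < r := by
        rcases Nat.eq_zero_or_pos r with h0 | h0
        · subst h0; simp at h
        · exact h0
      have hd : x / r < r := (Nat.div_lt_iff_lt_mul hr).mpr h
      exact ih ((r + x / r) / 2) (by omega) (am_gm_step x r hr)
    · rw [dif_neg h]
      push_neg at h
      have : r ≤ Nat.sqrt x := Nat.le_sqrt.mpr (by omega)
      omega

theorem isqrtP_eq (x : Int) (hx : 0 ≤ x) : isqrtP x = ((Nat.sqrt x.toNat : Nat) : Int) := by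
  rw [isqrtP]
  by_cases h : x < 2
  · rw [if_pos h]
    interval_cases x <;> simp
  · rw [if_neg h]
    rw [Nat.one_shiftLeft, newtonLoop_eq_sqrt _ _ (sqrt_le_init x.toNat)]

theorem floordiv_two_mul (t : Int) : PySem.Int.floordiv (2 * t) 2 = t := by
  rw [PySem.Int.floordiv_eq_ediv_of_pos (by omega)]
  omega

theorem tri_le_iff (N k : Nat) : tri (k + 1) ≤ N ↔ 2 * (k + 1) + 1 ≤ Nat.sqrt (8 * N + 1) := by
  have h2 := two_mul_tri (k + 1)
  have hsq : (2 * (k + 1) + 1) * (2 * (k + 1) + 1) = 8 * tri (k + 1) + 1 := by nlinarith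
  constructor
  · intro hle
    exact Nat.le_sqrt.mpr (by omega)
  · intro hle
    have hs := Nat.sqrt_le' (8 * N + 1)
    rw [pow_two] at hs
    have := Nat.mul_le_mul hle hle
    omega

theorem tri_succ (j : Nat) : tri (j + 1) = tri j + (j + 1) := by
  have h1 := two_mul_tri j
  have h2 := two_mul_tri (j + 1)
  nlinarith

theorem pairs_eq_range (n : Int) (hn : 1 ≤ n) :
    ∀ j : Nat, pairs n ((tri j : Nat) : Int) j
      = (PySem.List.pyRange ((j : Int) + 1) (((Nat.sqrt (8 * n.toNat + 1) - 1) / 2 : Nat) + 1) 1).map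
          (fun k => (PySem.Int.floordiv (k * (k - 1)) 2, PySem.Int.floordiv (k * (k + 1)) 2)) := by
  set N := n.toNat with hN
  have hnN : n = (N : Int) := by omega
  set q := Nat.sqrt (8 * N + 1) with hq
  have hq3 : 3 ≤ q := Nat.le_sqrt.mpr (by omega)
  set m := (q - 1) / 2 with hm
  intro j
  induction hd : m - j using Nat.strong_induction_on generalizing j with
  | _ d ih =>
    rw [pairs]
    have hguard : (((tri j : Nat) : Int) + ((j : Int) + 1) ≤ n) ↔ (j + 1 ≤ m) := by
      have hcast : ((tri j : Nat) : Int) + ((j : Int) + 1) = ((tri (j + 1) : Nat) : Int) := by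
        rw [tri_succ]; push_cast; ring
      rw [hcast, hnN]
      have hiff := tri_le_iff N j
      constructor
      · intro hle
        have : tri (j + 1) ≤ N := by exact_mod_cast hle
        have := hiff.mp this
        omega
      · intro hle
        have : tri (j + 1) ≤ N := hiff.mpr (by omega)
        exact_mod_cast this
    by_cases h : j + 1 ≤ m
    · rw [if_pos (hguard.mpr h)]
      rw [PySem.List.pyRange_one_cons (by omega)]
      rw [List.map_cons]
      have hnext := ih (m - (j + 1)) (by omega) (j + 1) rfl
      have hcast : ((tri j : Nat) : Int) + ((j : Int) + 1) = ((tri (j + 1) : Nat) : Int) := by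
        rw [tri_succ]; push_cast; ring
      rw [hcast]
      have harg : (((j + 1 : Nat)) : Int) + 1 = ((j : Int) + 1) + 1 := by push_cast; ring_nf
      rw [harg] at hnext
      rw [hnext]
      congr 1
      have h2 : (2 : Int) * ((tri j : Nat) : Int) = (j : Int) * ((j : Int) + 1) := by
        exact_mod_cast two_mul_tri j
      have h3 : (2 : Int) * ((tri (j + 1) : Nat) : Int)
          = ((j : Int) + 1) * (((j : Int) + 1) + 1) := by
        have := two_mul_tri (j + 1)
        exact_mod_cast this
      have hlo : ((j : Int) + 1) * (((j : Int) + 1) - 1) = 2 * ((tri j : Nat) : Int) := by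
        rw [h2]; ring
      have hhi : ((j : Int) + 1) * (((j : Int) + 1) + 1) = 2 * ((tri (j + 1) : Nat) : Int) := by
        rw [h3]
      rw [hlo, hhi, floordiv_two_mul, floordiv_two_mul, ← hcast]
    · rw [if_neg (fun hc => h (hguard.mp hc))]
      rw [PySem.List.pyRange_one_eq_nil (by omega), List.map_nil]

-- ===== VERDICT (by name: the statement is the Claim_ definition above) =====
theorem arrSplitter_spec : Claim_equal_arrSplitter := by
  intro n num _
  show arrSplitter n num = arrSplitter_alt n num
  unfold arrSplitter arrSplitter_alt
  have h := arrSplitterAux_eq n num 0 0 []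
  norm_num at h
  rw [h]
  by_cases hn : n ≤ 0
  · rw [if_pos hn, pairs, if_neg (by omega)]
    simp
  · rw [if_neg hn]
    push_neg at hn
    have hn1 : 1 ≤ n := hn
    have hsq := isqrtP_eq (8 * n + 1) (by omega)
    have htn : (8 * n + 1).toNat = 8 * n.toNat + 1 := by omega
    rw [htn] at hsq
    set q := Nat.sqrt (8 * n.toNat + 1) with hq
    have hq3 : 3 ≤ q := Nat.le_sqrt.mpr (by omega)
    have hmq : PySem.Int.floordiv (isqrtP (8 * n + 1) - 1) 2 = (((q - 1) / 2 : Nat) : Int) := by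
      rw [hsq, PySem.Int.floordiv_eq_ediv_of_pos (by omega)]
      omega
    rw [hmq]
    have hmain := pairs_eq_range n hn1 0
    simp only [Nat.cast_zero, tri] at hmain
    norm_num at hmain ⊢
    rw [hmain, List.map_map]
    rfl
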